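-- pv_equiv track=rewrite | github.com/JensMue/master_thesis | routing/utils.py | get_route_distances
-- ===== SOURCE A (Python) =====
-- def get_route_distances(routes, distance_matrix):
--     """Extracts the accumulated distances over the nodes in each solution route."""
--     distances = []
--     for route in routes:
--         route_distances = []
--         current_stop = route[0]
--         route_distance = 0
--         route_distances.append(route_distance)
--         for i in range(1,len(route)):
--             next_stop = route[i]
--             current_distance = distance_matrix[current_stop][next_stop]
--             route_distance += current_distance
--             route_distances.append(route_distance)
--             current_stop = next_stop
--         distances.append(route_distances)
--     return distances
-- ===== SOURCE B (Python) =====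
-- def _route_dists(route, distance_matrix):
--     """Distances along one route, recursively: the tail's distance list
--     shifted up by the first edge's weight, with a leading 0.
--     Correct because every prefix distance past the first node is that
--     prefix distance within the tail route plus the first edge's weight."""
--     first = route[0]
--     tail = route[1:]
--     if not tail:
--         return [0]
--     w = distance_matrix[first][tail[0]]
--     return [0] + [w + d for d in _route_dists(tail, distance_matrix)]
--
--
-- def get_route_distances(routes, distance_matrix):
--     """Extracts the accumulated distances over the nodes in each solution route."""
--     return [_route_dists(route, distance_matrix) for route in routes]
-- ===== Notes on version B (the rewrite author's own statement) =====
-- stated objective: alternative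
-- what changed: A keeps a running total and current stop in one fused forward loop; B has no accumulator at all: it recurses on the route, computing the tail route's distance list and shifting every element of it by the first edge's weight (prepending 0).
import Mathlib
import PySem

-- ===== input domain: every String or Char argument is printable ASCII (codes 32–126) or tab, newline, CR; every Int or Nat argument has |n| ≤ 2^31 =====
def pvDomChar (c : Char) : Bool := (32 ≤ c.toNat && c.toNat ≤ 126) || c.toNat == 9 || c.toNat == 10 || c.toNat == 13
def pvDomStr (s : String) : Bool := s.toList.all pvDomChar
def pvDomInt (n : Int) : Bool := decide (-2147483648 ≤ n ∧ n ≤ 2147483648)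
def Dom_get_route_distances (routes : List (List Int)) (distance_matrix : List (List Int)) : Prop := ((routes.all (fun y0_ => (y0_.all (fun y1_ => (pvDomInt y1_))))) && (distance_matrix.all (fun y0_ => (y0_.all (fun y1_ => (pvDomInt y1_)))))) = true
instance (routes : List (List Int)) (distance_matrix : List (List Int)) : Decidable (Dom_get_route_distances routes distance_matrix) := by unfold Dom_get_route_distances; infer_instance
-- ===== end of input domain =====

-- B replaces A's fused running-total loop by a recursion with no accumulator:
-- a route's distance list is the tail route's distance list shifted up by the
-- first edge's weight, with a leading 0 (alternative algorithm, same value).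

-- ===== PORT A =====
-- distance_matrix[u][v]: Python chained indexing; default only reached where Python raises (excluded by Pre_)
def pvLook (distance_matrix : List (List Int)) (u v : Int) : Int :=
  PySem.List.pyGetD (PySem.List.pyGetD distance_matrix u []) v 0

def get_route_distances (routes : List (List Int)) (distance_matrix : List (List Int)) : List (List Int) :=
  routes.foldl (fun distances route =>
    -- current_stop = route[0] (raises on empty route: excluded by Pre_)
    let current_stop := PySem.List.pyGetD route 0 0
    -- state: (route_distances, current_stop, route_distance)
    let st := (PySem.List.pyRange 1 (route.length : Int) 1).foldl
      (fun (s : List Int × Int × Int) i =>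
        let next_stop := PySem.List.pyGetD route i 0
        let current_distance := pvLook distance_matrix s.2.1 next_stop
        let route_distance := s.2.2 + current_distance
        (s.1 ++ [route_distance], next_stop, route_distance))
      ([(0 : Int)], current_stop, (0 : Int))
    distances ++ [st.1]) []

-- ===== PORT B =====
-- _route_dists: recursion on the route; 'first = route[0]' raises in Python on
-- the empty route (excluded by Pre_), so the [] case's value is never claimed.
def pvRouteDists (dm : List (List Int)) : List Int → List Int
  | [] => []
  | first :: tail =>
    match tail with
    | [] => [(0 : Int)]
    | t0 :: _ =>
      let w := pvLook dm first t0
      0 :: (pvRouteDists dm tail).map (fun d => w + d)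

def get_route_distances_alt (routes : List (List Int)) (distance_matrix : List (List Int)) : List (List Int) :=
  routes.map (fun route => pvRouteDists distance_matrix route)

-- ===== PRECONDITION & SPEC =====
-- dm[u][v] succeeds (Python indexing, negative wrap allowed)
def pvEdgeOk (distance_matrix : List (List Int)) (p : Int × Int) : Bool :=
  ((PySem.List.pyGet? distance_matrix p.1).bind
    (fun row => PySem.List.pyGet? row p.2)).isSome

-- exactly the inputs where Python A returns: every route nonempty (route[0]) and
-- every adjacent distance_matrix lookup in range
def Pre_get_route_distances (routes : List (List Int)) (distance_matrix : List (List Int)) : Prop :=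
  (routes.all (fun r => !r.isEmpty && (r.zip r.tail).all (pvEdgeOk distance_matrix))) = true
instance (routes : List (List Int)) (distance_matrix : List (List Int)) : Decidable (Pre_get_route_distances routes distance_matrix) := by unfold Pre_get_route_distances; infer_instance

def pvWitness_get_route_distances : List (List Int) × List (List Int) :=
  ([[0, 1], [1]], [[0, 5], [7, 0]])

def Spec_get_route_distances (routes : List (List Int)) (distance_matrix : List (List Int)) (out : List (List Int)) : Prop := out = get_route_distances_alt routes distance_matrix
instance (routes : List (List Int)) (distance_matrix : List (List Int)) (out : List (List Int)) : Decidable (Spec_get_route_distances routes distance_matrix out) := by unfold Spec_get_route_distances; infer_instance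

-- ===== CLAIM (what is proved, stated in full; the proofs are below) =====
def Claim_equal_get_route_distances : Prop := ∀ (routes : List (List Int)) (distance_matrix : List (List Int)), Dom_get_route_distances routes distance_matrix → Pre_get_route_distances routes distance_matrix → Spec_get_route_distances routes distance_matrix (get_route_distances routes distance_matrix)

-- ===== LEMMAS AND PROOFS =====

-- running prefix totals of a weight list, starting after total rd
def pvPrefixesFrom (rd : Int) : List Int → List Int
  | [] => []
  | w :: ws => (rd + w) :: pvPrefixesFrom (rd + w) ws

-- A's fused inner loop produces acc ++ prefix totals of the chained edge weights
theorem pvA_inner (dm : List (List Int)) (rest : List Int) :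
    ∀ (cs rd : Int) (acc : List Int),
    (rest.foldl
      (fun (s : List Int × Int × Int) ns =>
        (s.1 ++ [s.2.2 + pvLook dm s.2.1 ns], ns, s.2.2 + pvLook dm s.2.1 ns))
      (acc, cs, rd)).1
    = acc ++ pvPrefixesFrom rd (List.zipWith (pvLook dm) (cs :: rest) rest) := by
  induction rest with
  | nil => intro cs rd acc; simp [pvPrefixesFrom]
  | cons ns rest' ih =>
      intro cs rd acc
      simp only [List.foldl_cons, List.zipWith_cons_cons, pvPrefixesFrom]
      rw [ih]
      simp

-- shifting every prefix total by w is starting the totals w higher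
theorem pvMap_shift (w : Int) (ws : List Int) :
    ∀ rd : Int, (pvPrefixesFrom rd ws).map (fun d => w + d) = pvPrefixesFrom (w + rd) ws := by
  induction ws with
  | nil => intro rd; simp [pvPrefixesFrom]
  | cons x ws' ih =>
      intro rd
      simp only [pvPrefixesFrom, List.map_cons, ih, add_assoc]

-- B's recursion produces the same prefix totals, with the leading 0
theorem pvB_eq (dm : List (List Int)) (rest : List Int) :
    ∀ u : Int, pvRouteDists dm (u :: rest)
      = 0 :: pvPrefixesFrom 0 (List.zipWith (pvLook dm) (u :: rest) rest) := by
  induction rest with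
  | nil => intro u; simp [pvRouteDists, pvPrefixesFrom]
  | cons v rest' ih =>
      intro u
      have hstep : pvRouteDists dm (u :: v :: rest')
          = 0 :: (pvRouteDists dm (v :: rest')).map (fun d => pvLook dm u v + d) := rfl
      rw [hstep, ih v]
      simp only [List.zipWith_cons_cons, List.map_cons, pvMap_shift, pvPrefixesFrom]
      simp

theorem pv_per_route (dm : List (List Int)) (v : Int) (rest : List Int) :
    ((PySem.List.pyRange 1 (((v :: rest).length : Nat) : Int) 1).foldl
      (fun (s : List Int × Int × Int) i =>
        (s.1 ++ [s.2.2 + pvLook dm s.2.1 (PySem.List.pyGetD (v :: rest) i 0)],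
         PySem.List.pyGetD (v :: rest) i 0,
         s.2.2 + pvLook dm s.2.1 (PySem.List.pyGetD (v :: rest) i 0)))
      ([(0 : Int)], v, (0 : Int))).1 = pvRouteDists dm (v :: rest) := by
  rw [PySem.List.foldl_pyRange_pyGetD' (v :: rest) 0
        (f := fun (s : List Int × Int × Int) e =>
          (s.1 ++ [s.2.2 + pvLook dm s.2.1 e], e, s.2.2 + pvLook dm s.2.1 e))
        (init := ([(0 : Int)], v, (0 : Int))) (a := 1) (by norm_num)]
  rw [pvA_inner, pvB_eq]
  simp

-- per-route equality for every nonempty route (empty routes raise in Python; outside Pre_)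
theorem pv_route_eq (dm : List (List Int)) (route : List Int) (hne : route ≠ []) :
    ((PySem.List.pyRange 1 ((route.length : Nat) : Int) 1).foldl
      (fun (s : List Int × Int × Int) i =>
        (s.1 ++ [s.2.2 + pvLook dm s.2.1 (PySem.List.pyGetD route i 0)],
         PySem.List.pyGetD route i 0,
         s.2.2 + pvLook dm s.2.1 (PySem.List.pyGetD route i 0)))
      ([(0 : Int)], PySem.List.pyGetD route 0 0, (0 : Int))).1
    = pvRouteDists dm route := by
  cases route with
  | nil => exact absurd rfl hne
  | cons v rest =>
      have h0 : PySem.List.pyGetD (v :: rest) 0 0 = v := by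
        simp [PySem.List.pyGetD, PySem.List.pyGet?, PySem.List.pyIdx?]
      rw [h0]
      exact pv_per_route dm v rest

-- ===== VERDICT (by name: the statement is the Claim_ definition above) =====
theorem get_route_distances_spec : Claim_equal_get_route_distances := by
  intro routes dm _ hpre
  unfold Spec_get_route_distances get_route_distances get_route_distances_alt
  rw [PySem.List.foldl_append_singleton_eq_map]
  simp only [List.nil_append]
  refine List.map_congr_left (fun route hmem => ?_)
  have h := List.all_eq_true.mp hpre route hmem
  have hne : route ≠ [] := by
    simp only [Bool.and_eq_true] at h
    simpa [List.isEmpty_iff] using h.1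
  exact pv_route_eq dm route hne
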